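-- pv_equiv track=rewrite | github.com/zoombegod/http-turtle | gehttp.py | parse_port
-- ===== SOURCE A (Python) =====
-- def expand_dash(num_expr):
--
--   """ In a numeric expression expand the dash """
--
--   numbers = [int(i) for i in num_expr.split('-')]
--
--   if len(numbers) != 2 or\
--     type(numbers[0]) != int or\
--     type(numbers[1]) != int:
--     return False
--
--   numbers = [i for i in range(numbers[0], numbers[1]+1)]
--
--   return numbers
--
-- def parse_port(port_expr):
--
--   """ Parse the port argument, expand expressions, recursive """
--
--   # Expand comma
--
--   if ',' in port_expr:
--     ports_expanded = []
--
--     for expr in port_expr.split(','):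
--       ports_expanded += parse_port(expr)
--
--     return ports_expanded
--
--
--   # Expand dash
--
--   elif '-' in port_expr:
--     ports_expanded = []
--
--     ports_expanded = expand_dash(port_expr)
--
--     if ports_expanded:
--       return ports_expanded
--
--     else:
--       return False
--
--
--   # Nothing to expand, termination condition
--
--   else:
--     return [int(port_expr)]
-- ===== SOURCE B (Python) =====
-- def parse_port(port_expr):
--     """Parse the port argument, expand expressions, iterative single pass."""
--     result = []
--     for token in port_expr.split(','):
--         if '-' in token:
--             lo, hi = map(int, token.split('-'))
--             if lo > hi:
--                 raise ValueError("empty port range: " + token)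
--             result.extend(range(lo, hi + 1))
--         else:
--             result.append(int(token))
--     return result
-- ===== Notes on version B (the rewrite author's own statement) =====
-- stated objective: simpler
-- what changed: Replaces A's two-level recursion (parse_port calling itself on each comma token, with expand_dash's False sentinel flowing through truthiness checks) by a single iterative pass over the comma-split tokens that expands each token in place and raises ValueError on malformed tokens or empty ranges.
-- outside the precondition, e.g. on parse_port('3-1'): A returns False, B raises ValueError; on parse_port('1-2-3'): A returns False, B raises ValueError; on parse_port('3-1,5'): A raises TypeError, B raises ValueError
import Mathlib
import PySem

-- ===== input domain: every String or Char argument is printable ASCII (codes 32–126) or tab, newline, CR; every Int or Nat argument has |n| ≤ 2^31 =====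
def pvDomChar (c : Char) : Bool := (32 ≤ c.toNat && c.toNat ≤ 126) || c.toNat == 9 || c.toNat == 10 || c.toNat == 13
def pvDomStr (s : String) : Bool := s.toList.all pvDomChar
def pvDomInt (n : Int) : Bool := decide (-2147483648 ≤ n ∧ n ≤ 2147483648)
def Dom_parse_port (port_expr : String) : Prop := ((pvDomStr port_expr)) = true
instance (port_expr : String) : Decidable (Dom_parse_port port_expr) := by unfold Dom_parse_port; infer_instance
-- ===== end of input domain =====

-- B replaces A's two-level recursion by one iterative pass over the comma-split tokens,
-- expanding each token in place; equivalence is claimed on Pre_ (inputs where A returns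
-- a list without raising).

-- ===== PORT A =====
-- s.split(sep) for a non-empty literal sep (split? is none only for sep = "", so getD is exact)
def pySplitA (s sep : String) : List String := (PySem.Str.split? s sep).getD []

-- '[int(i) for i in parts]' — none = ValueError from int()
def pyIntList : List String → Option (List Int)
  | [] => some []
  | s :: rest =>
    match PySem.Int.ofStr? s with
    | none => none
    | some n =>
      match pyIntList rest with
      | none => none
      | some ns => some (n :: ns)

-- expand_dash: outer none = ValueError; 'some none' = the Python 'return False'
def pyExpandDash (num_expr : String) : Option (Option (List Int)) :=
  match pyIntList (pySplitA num_expr "-") with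
  | none => none
  | some [a, b] => some (some (PySem.List.pyRange a (b + 1) 1))
  | some _other => some none   -- len(numbers) != 2: return False (the type() checks are inert)

-- parse_port on a comma-free string (A's recursive call always receives one, since the
-- arguments come from port_expr.split(','); the ',' branch can never fire there)
def pyParsePort1 (expr : String) : Option (Option (List Int)) :=
  if PySem.Str.isIn "-" expr then
    match pyExpandDash expr with
    | none => none
    | some none => some none                                   -- expand_dash gave False
    | some (some l) => if l.isEmpty then some none else some (some l)  -- 'if ports_expanded'
  else
    match PySem.Int.ofStr? expr with
    | none => none
    | some n => some (some [n])

def parse_port (port_expr : String) : List Int :=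
  let r : Option (Option (List Int)) :=
    if PySem.Str.isIn "," port_expr then
      (pySplitA port_expr ",").foldl
        (fun acc expr =>
          match acc with
          | some (some l) =>
            match pyParsePort1 expr with
            | some (some l') => some (some (l ++ l'))  -- ports_expanded += parse_port(expr)
            | some none => none                        -- '+= False' is a TypeError
            | none => none                             -- a raise propagates
          | some none => some none
          | none => none)
        (some (some []))
    else pyParsePort1 port_expr
  match r with
  | some (some l) => l
  | some none => []   -- A returns False here; such inputs are outside Pre_parse_port
  | none => []        -- A raises here; such inputs are outside Pre_parse_port

-- ===== PORT B =====
-- s.split(sep) for a non-empty literal sep (split? is none only for sep = "", so getD is exact)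
def pySplitB (s sep : String) : List String := (PySem.Str.split? s sep).getD []

-- expand one comma-free token: none = Source B's ValueError (bad int, bad unpacking, or lo > hi)
def altExpandTok (token : String) : Option (List Int) :=
  if PySem.Str.isIn "-" token then
    match pySplitB token "-" with
    | [s1, s2] =>
      match PySem.Int.ofStr? s1, PySem.Int.ofStr? s2 with
      | some lo, some hi =>
        if hi < lo then none   -- Source B: raise ValueError on an empty range
        else some (PySem.List.pyRange lo (hi + 1) 1)
      | some _, none => none
      | none, _ => none
    | _parts => none
  else (PySem.Int.ofStr? token).map (fun n => [n])

def parse_port_alt (port_expr : String) : List Int :=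
  (pySplitB port_expr ",").foldl
    (fun result token =>
      match altExpandTok token with
      | some l => result ++ l
      | none => result)   -- Source B raises ValueError here; such inputs are outside Pre_parse_port
    []

-- ===== PRECONDITION & SPEC =====
-- s.split(sep) for a non-empty literal sep, again (kept separate from the ports' helpers)
def pvSplit (s sep : String) : List String := (PySem.Str.split? s sep).getD []

-- a token on which A's recursion yields a (truthy or singleton) list of ints
def ValidTok (t : String) : Bool :=
  if PySem.Str.isIn "-" t then
    match pvSplit t "-" with
    | [s1, s2] =>
      match PySem.Int.ofStr? s1, PySem.Int.ofStr? s2 with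
      | some a, some b => decide (a ≤ b)
      | some _, none => false
      | none, _ => false
    | _parts => false
  else (PySem.Int.ofStr? t).isSome

-- Pre_ excludes exactly the inputs where A does not return a list of ints: a token whose
-- int() parse fails (ValueError), a dash token that does not split into exactly two ints
-- (False, or TypeError under a comma), and an empty dash range a > b (False / TypeError).
def Pre_parse_port (port_expr : String) : Prop :=
  (pvSplit port_expr ",").all ValidTok = true
instance (port_expr : String) : Decidable (Pre_parse_port port_expr) := by
  unfold Pre_parse_port; infer_instance

def pvWitness_parse_port : String := "80,100-102"

def Spec_parse_port (port_expr : String) (out : List Int) : Prop := out = parse_port_alt port_expr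
instance (port_expr : String) (out : List Int) : Decidable (Spec_parse_port port_expr out) := by
  unfold Spec_parse_port; infer_instance

-- ===== CLAIM (what is proved, stated in full; the proofs are below) =====
def Claim_equal_parse_port : Prop := ∀ (port_expr : String), Dom_parse_port port_expr → Pre_parse_port port_expr → Spec_parse_port port_expr (parse_port port_expr)

-- ===== LEMMAS AND PROOFS =====

-- splitOn.go does nothing when sep does not occur in l
theorem splitOn_go_no_occ (sep : List Char) :
    ∀ (fuel : Nat) (l cur : List Char) (acc : List (List Char)), ¬ (sep <:+: l) →
      PySem.Chars.splitOn.go sep fuel l cur acc = ((cur.reverse ++ l) :: acc).reverse := by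
  intro fuel
  induction fuel with
  | zero => intro l cur acc _; rfl
  | succ n ih =>
    intro l cur acc hocc
    cases l with
    | nil => simp [PySem.Chars.splitOn.go]
    | cons c rest =>
      have hpre : sep.isPrefixOf (c :: rest) = false := by
        by_contra h
        exact hocc (List.IsPrefix.isInfix (List.isPrefixOf_iff_prefix.mp (by simpa using h)))
      rw [PySem.Chars.splitOn.go, hpre]
      simp only [Bool.false_eq_true, if_false]
      rw [ih rest (c :: cur) acc (fun h => hocc (h.trans (List.suffix_cons c rest).isInfix))]
      simp

theorem splitOn_no_occ (sep l : List Char) (h : ¬ (sep <:+: l)) :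
    PySem.Chars.splitOn l sep = [l] := by
  rw [PySem.Chars.splitOn, splitOn_go_no_occ sep _ l [] [] h]; simp

theorem split_not_in (s sep : String) (hsep : sep.toList ≠ [])
    (h : PySem.Str.isIn sep s = false) : (PySem.Str.split? s sep).getD [] = [s] := by
  have hocc : ¬ (sep.toList <:+: s.toList) := by
    have := PySem.Chars.isIn_eq_false_iff sep.toList s.toList
    simp only [PySem.Str.isIn_eq] at h
    exact this.mp h
  have hchars : PySem.Chars.split? s.toList sep.toList = some [s.toList] := by
    simp [PySem.Chars.split?, List.isEmpty_iff, hsep, splitOn_no_occ _ _ hocc]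
  have hb := PySem.Str.split?_map s sep
  rw [hchars] at hb
  cases hstr : PySem.Str.split? s sep with
  | none => rw [hstr] at hb; simp at hb
  | some parts =>
    rw [hstr] at hb
    simp only [Option.map_some, Option.some.injEq] at hb
    cases parts with
    | nil => simp at hb
    | cons p rest =>
      cases rest with
      | nil =>
        simp only [List.map_cons, List.map_nil, List.cons.injEq, and_true] at hb
        have : p = s := by
          have := congrArg String.ofList hb; simpa using this
        simp [this]
      | cons q rest' => simp at hb

theorem pySplitA_eq (s sep : String) : pySplitA s sep = pvSplit s sep := rfl
theorem pySplitB_eq (s sep : String) : pySplitB s sep = pvSplit s sep := rfl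
theorem pvSplit_not_in (s sep : String) (hsep : sep.toList ≠ [])
    (h : PySem.Str.isIn sep s = false) : pvSplit s sep = [s] :=
  split_not_in s sep hsep h

theorem parse_port_token (t : String) (h : ValidTok t = true) :
    ∃ l, pyParsePort1 t = some (some l) ∧ altExpandTok t = some l := by
  unfold ValidTok at h
  by_cases hd : PySem.Str.isIn "-" t = true
  · have hd' : PySem.Chars.isIn ['-'] t.toList = true := by simpa using hd
    rw [if_pos hd] at h
    cases hs : pvSplit t "-" with
    | nil => rw [hs] at h; simp at h
    | cons s1 rest =>
      cases rest with
      | nil => rw [hs] at h; simp at h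
      | cons s2 rest' =>
        cases rest' with
        | cons s3 rest'' => rw [hs] at h; simp at h
        | nil =>
          rw [hs] at h
          cases h1 : PySem.Int.ofStr? s1 with
          | none => simp [h1] at h
          | some a =>
            cases h2 : PySem.Int.ofStr? s2 with
            | none => simp [h1, h2] at h
            | some b =>
              have hab : a ≤ b := by simpa [h1, h2] using h
              refine ⟨PySem.List.pyRange a (b + 1) 1, ?_, ?_⟩
              · have hne : PySem.List.pyRange a (b + 1) 1 ≠ [] := by
                  rw [PySem.List.pyRange_one_cons (by omega)]; simp
                simp [pyParsePort1, hd', pyExpandDash, pySplitA_eq, hs, pyIntList, h1, h2,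
                  List.isEmpty_iff, hne]
              · have hnlt : ¬ b < a := by omega
                simp [altExpandTok, hd', pySplitB_eq, hs, h1, h2, hnlt]
  · have hd' : PySem.Chars.isIn ['-'] t.toList = false := by
      simpa using (Bool.not_eq_true _).mp hd
    rw [if_neg hd] at h
    cases h1 : PySem.Int.ofStr? t with
    | none => simp [h1] at h
    | some n =>
      exact ⟨[n], by simp [pyParsePort1, hd', h1], by simp [altExpandTok, hd', h1]⟩

theorem parse_port_fold (ts : List String) (h : ts.all ValidTok = true) (l0 : List Int) :
    ts.foldl
        (fun acc expr =>
          match acc with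
          | some (some l) =>
            match pyParsePort1 expr with
            | some (some l') => some (some (l ++ l'))
            | some none => none
            | none => none
          | some none => some none
          | none => none)
        (some (some l0))
      = some (some (ts.foldl
          (fun result token =>
            match altExpandTok token with
            | some l => result ++ l
            | none => result) l0)) := by
  induction ts generalizing l0 with
  | nil => rfl
  | cons t rest ih =>
    simp only [List.all_cons, Bool.and_eq_true] at h
    obtain ⟨l, hA, hB⟩ := parse_port_token t h.1
    simp only [List.foldl_cons, hA, hB]
    exact ih h.2 (l0 ++ l)

-- ===== VERDICT (by name: the statement is the Claim_ definition above) =====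
theorem parse_port_spec : Claim_equal_parse_port := by
  intro s _ hpre
  unfold Spec_parse_port parse_port parse_port_alt
  unfold Pre_parse_port at hpre
  by_cases hc : PySem.Str.isIn "," s = true
  · rw [if_pos hc, pySplitA_eq, pySplitB_eq, parse_port_fold _ (by simpa using hpre) []]
  · rw [if_neg hc]
    have hs : pvSplit s "," = [s] := pvSplit_not_in s "," (by decide) ((Bool.not_eq_true _).mp hc)
    rw [pySplitB_eq, hs] at ⊢
    rw [hs] at hpre
    simp only [List.all_cons, List.all_nil, Bool.and_true] at hpre
    obtain ⟨l, hA, hB⟩ := parse_port_token s hpre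
    simp [hA, hB]
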